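-- pv_equiv track=rewrite | github.com/herolava259/Coding-Interview-Practice | HackerRankWithAlgorithm/DynamicProgramming/MagradonaForest.py | mandragora
-- ===== SOURCE A (Python) =====
-- def mandragora(H):
--
--     H.sort()
--     sums = sum(H)
--
--     max_exp = sums
--     n = len(H)
--
--     for i in range(n):
--         sums -= H[i]
--         tmp_exp = sums*(i+2)
--
--         max_exp = max(max_exp, tmp_exp)
--
--     return max_exp
-- ===== SOURCE B (Python) =====
-- def mandragora(H):
--     # Divide and conquer on the sorted list: go(l, r, w) returns
--     # (sum(S[l:r]), max over k in [l, r) of (k+1)*(sum(S[k:r]) + w)),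
--     # where w is the sum of everything to the right of the segment.
--     # The answer is the best split point together with the always-available 0
--     # (eating every mandragora). A sorts H in place; B leaves H untouched
--     # (the equivalence is about the return value only).
--     if not H:
--         return 0
--     S = sorted(H)
--
--     def go(l, r, w):
--         if r - l <= 1:
--             v = S[l] + w
--             return S[l], (l + 1) * v
--         m = (l + r) // 2
--         sr, br = go(m, r, w)
--         sl, bl = go(l, m, w + sr)
--         return sl + sr, max(bl, br)
--
--     _, b = go(0, len(S), 0)
--     return max(b, 0)
-- ===== Notes on version B (the rewrite author's own statement) =====
-- stated objective: alternative
-- what changed: Replaces A's fused forward scan (total sum precomputed, then decremented in a loop while tracking the max) with a divide-and-conquer recursion over the sorted list: go(l,r,w) halves the segment, solves the right half first, threads its sum into the left half, and combines (segment sum, segment max); B also does not mutate H, whereas A sorts it in place.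
import Mathlib
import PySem

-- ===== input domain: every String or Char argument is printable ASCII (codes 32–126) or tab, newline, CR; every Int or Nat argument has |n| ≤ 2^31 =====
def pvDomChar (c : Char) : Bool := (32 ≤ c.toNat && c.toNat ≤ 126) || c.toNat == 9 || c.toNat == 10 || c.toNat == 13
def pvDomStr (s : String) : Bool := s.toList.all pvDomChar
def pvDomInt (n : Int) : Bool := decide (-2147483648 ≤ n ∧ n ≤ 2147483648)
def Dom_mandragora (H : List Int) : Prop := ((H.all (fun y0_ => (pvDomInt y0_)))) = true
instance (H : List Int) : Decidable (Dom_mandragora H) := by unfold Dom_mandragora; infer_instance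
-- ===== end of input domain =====

-- B replaces A's fused forward scan (running sum decremented while tracking the max) with a
-- divide-and-conquer over the sorted list that combines segment sums and segment maxima;
-- equivalence is about the return value only (A sorts H in place, B does not mutate H).


-- ===== PORT A =====
-- A's for-loop: at entry of each step `sums` is the sum of the current element and the
-- not-yet-visited tail; `k` is the Python loop index i.
def mandragoraLoopA (sums maxExp : Int) (k : Nat) : List Int → Int
  | [] => maxExp
  | h :: t =>
    let sums' := sums - h
    let tmp := sums' * ((k : Int) + 2)
    mandragoraLoopA sums' (max maxExp tmp) (k + 1) t

def mandragora (H : List Int) : Int :=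
  let S := PySem.List.sorted H (fun x => x) false
  let sums := S.sum
  mandragoraLoopA sums sums 0 S

-- ===== PORT B =====
-- Source B's inner `go(l, r, w)` over the sorted list S; every call keeps l < r ≤ S.length,
-- so `S.getD l 0` is exactly Python's `S[l]` on every index the recursion reaches.
def mandragoraGo (S : List Int) (l r : Nat) (w : Int) : Int × Int :=
  if r - l ≤ 1 then
    (S.getD l 0, ((l : Int) + 1) * (S.getD l 0 + w))
  else
    let m := (l + r) / 2
    let pr := mandragoraGo S m r w
    let pl := mandragoraGo S l m (w + pr.1)
    (pl.1 + pr.1, max pl.2 pr.2)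
termination_by r - l
decreasing_by all_goals omega

def mandragora_alt (H : List Int) : Int :=
  if H = [] then 0
  else
    let S := PySem.List.sorted H (fun x => x) false
    max (mandragoraGo S 0 S.length 0).2 0

-- ===== PRECONDITION & SPEC =====
def Spec_mandragora (H : List Int) (out : Int) : Prop := out = mandragora_alt H
instance (H : List Int) (out : Int) : Decidable (Spec_mandragora H out) := by unfold Spec_mandragora; infer_instance

-- ===== CLAIM (what is proved, stated in full; the proofs are below) =====
def Claim_equal_mandragora : Prop := ∀ (H : List Int), Dom_mandragora H → Spec_mandragora H (mandragora H)

-- ===== LEMMAS AND PROOFS =====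

-- sum of the segment S[l:r]
def segSum (S : List Int) (l r : Nat) : Int := ((S.drop l).take (r - l)).sum

-- the candidate values go(l, r, w) maximises over: (k+1)*(sum S[k:r] + w) for k ∈ [l, r)
def vlist (S : List Int) (l r : Nat) (w : Int) : List Int :=
  (List.range' l (r - l)).map (fun (k : Nat) => ((k : Int) + 1) * (segSum S k r + w))

-- max of a nonempty list (0 on [])
def nmax : List Int → Int
  | [] => 0
  | x :: xs => xs.foldl max x

theorem foldl_max_ne_nil (a : Int) (ys : List Int) (h : ys ≠ []) :
    ys.foldl max a = max a (nmax ys) := by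
  match ys with
  | y :: t =>
    clear h
    induction t generalizing a y with
    | nil => simp [nmax]
    | cons z t ih =>
      simp only [List.foldl, nmax] at *
      rw [ih (max a y) z, ih y z, max_assoc]

theorem nmax_append (xs ys : List Int) (hy : ys ≠ []) (hx : xs ≠ []) :
    nmax (xs ++ ys) = max (nmax xs) (nmax ys) := by
  match xs with
  | x :: t =>
    simp only [nmax, List.cons_append, List.foldl_append]
    exact foldl_max_ne_nil _ _ hy

theorem segSum_split (S : List Int) (k m r : Nat) (h1 : k ≤ m) (h2 : m ≤ r) :
    segSum S k m + segSum S m r = segSum S k r := by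
  unfold segSum
  have hd : S.drop m = (S.drop k).drop (m - k) := by
    rw [List.drop_drop]; congr 1; omega
  rw [hd, show r - k = (m - k) + (r - m) by omega, List.take_add, List.sum_append]

theorem segSum_one (S : List Int) (l : Nat) (hl : l < S.length) :
    segSum S l (l + 1) = S.getD l 0 := by
  unfold segSum
  rw [show l + 1 - l = 1 by omega]
  rcases h : S.drop l with _ | ⟨x, t⟩
  · have : S.length - l = 0 := by
      have := congrArg List.length h; simpa using this
    omega
  · have hlen : 0 < (S.drop l).length := by simp [h]
    have h0 : (S.drop l)[0]'hlen = x := by simp [h]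
    have hx : x = S[l] := by
      rw [← h0]; exact (List.getElem_drop (h := hlen))
    simp [List.getD_eq_getElem?_getD, List.getElem?_eq_getElem hl, ← hx]

theorem vlist_split (S : List Int) (l m r : Nat) (w : Int) (h1 : l ≤ m) (h2 : m ≤ r) :
    vlist S l m (w + segSum S m r) ++ vlist S m r w = vlist S l r w := by
  unfold vlist
  have hmap : List.map (fun (k : Nat) => ((k : Int) + 1) * (segSum S k m + (w + segSum S m r)))
      (List.range' l (m - l))
      = List.map (fun (k : Nat) => ((k : Int) + 1) * (segSum S k r + w)) (List.range' l (m - l)) := by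
    apply List.map_congr_left
    intro k hk
    have hkm : k < m := by
      have := List.mem_range'_1.mp hk; omega
    rw [← segSum_split S k m r (by omega) h2]
    ring
  rw [hmap, ← List.map_append]
  have hr : List.range' l (m - l) ++ List.range' m (r - m) = List.range' l (r - l) := by
    have h := List.range'_append (s := l) (m := m - l) (n := r - m) (step := 1)
    rw [show l + 1 * (m - l) = m by omega, show m - l + (r - m) = r - l by omega] at h
    exact h
  rw [hr]

theorem vlist_ne_nil (S : List Int) (l r : Nat) (w : Int) (h : l < r) :
    vlist S l r w ≠ [] := by
  unfold vlist
  simp only [ne_eq, List.map_eq_nil_iff, List.range'_eq_nil_iff]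
  omega

theorem mandragoraGo_spec (S : List Int) (d l r : Nat) (w : Int) (hd : r - l ≤ d)
    (hlr : l < r) (hr : r ≤ S.length) :
    mandragoraGo S l r w = (segSum S l r, nmax (vlist S l r w)) := by
  induction d generalizing l r w with
  | zero => omega
  | succ d ih =>
    rw [mandragoraGo]
    by_cases h1 : r - l ≤ 1
    · have hr1 : r = l + 1 := by omega
      subst hr1
      rw [if_pos h1]
      have hseg := segSum_one S l (by omega)
      have hv : vlist S l (l + 1) w = [((l : Int) + 1) * (segSum S l (l + 1) + w)] := by
        unfold vlist
        rw [show l + 1 - l = 1 by omega]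
        simp [List.range']
      rw [hv, hseg]
      simp [nmax]
    · rw [if_neg h1]
      simp only []
      have hm1 : l < (l + r) / 2 := by omega
      have hm2 : (l + r) / 2 < r := by omega
      rw [ih ((l + r) / 2) r w (by omega) hm2 hr,
          ih l ((l + r) / 2) (w + segSum S ((l + r) / 2) r) (by omega) hm1 (by omega)]
      simp only
      rw [segSum_split S l ((l + r) / 2) r (by omega) (by omega)]
      rw [← vlist_split S l ((l + r) / 2) r w (by omega) (by omega),
          nmax_append _ _ (vlist_ne_nil S _ _ _ hm2) (vlist_ne_nil S _ _ _ hm1)]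

-- the values A's loop feeds into max, starting at loop index k
def tailVals (k : Nat) : List Int → List Int
  | [] => []
  | _ :: t => t.sum * ((k : Int) + 2) :: tailVals (k + 1) t

theorem loopA_foldl (S : List Int) : ∀ (k : Nat) (m : Int),
    mandragoraLoopA S.sum m k S = (tailVals k S).foldl max m := by
  induction S with
  | nil => intro k m; simp [mandragoraLoopA, tailVals]
  | cons h t ih =>
    intro k m
    simp only [mandragoraLoopA, tailVals, List.foldl, List.sum_cons]
    rw [show h + t.sum - h = t.sum by ring]
    exact ih (k + 1) (max m (t.sum * ((k : Int) + 2)))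

theorem tailVals_eq (T : List Int) : ∀ (k : Nat),
    tailVals k T = (List.range T.length).map
      (fun i => (T.drop (i + 1)).sum * ((k : Int) + (i : Int) + 2)) := by
  induction T with
  | nil => intro k; simp [tailVals]
  | cons h t ih =>
    intro k
    simp only [tailVals, List.length_cons, List.range_succ_eq_map, List.map_cons, List.map_map]
    congr 1
    rw [ih (k + 1)]
    apply List.map_congr_left
    intro i _
    simp only [Function.comp_apply, Nat.succ_eq_add_one, List.drop_succ_cons]
    push_cast
    ring

theorem main_eq (H : List Int) : mandragora H = mandragora_alt H := by
  by_cases hH : H = []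
  · subst hH
    simp [mandragora, mandragora_alt, PySem.List.sorted, mandragoraLoopA]
  · unfold mandragora mandragora_alt
    rw [if_neg hH]
    simp only []
    set S := PySem.List.sorted H (fun x => x) false with hS
    have hSne : S ≠ [] := by
      intro h
      apply hH
      have := PySem.List.sorted_perm (xs := H) (key := fun x => x) (rev := false)
      rw [← hS, h] at this
      exact (List.Perm.nil_eq this).symm
    set n := S.length with hn
    have hn1 : 1 ≤ n := by
      rcases S with _ | _
      · exact absurd rfl hSne
      · simp [hn]
    set fval : Nat → Int := fun k => ((k : Int) + 1) * (S.drop k).sum with hfval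
    -- B's inner recursion in closed form
    rw [mandragoraGo_spec S n 0 n 0 (by omega) (by omega) (by omega)]
    have hv : vlist S 0 n 0 = (List.range' 0 n).map fval := by
      unfold vlist
      rw [Nat.sub_zero]
      apply List.map_congr_left
      intro k hk
      have hkn : k < n := by have := List.mem_range'_1.mp hk; omega
      have : segSum S k n = (S.drop k).sum := by
        unfold segSum
        rw [List.take_of_length_le (by simp [← hn])]
      rw [this, hfval, add_zero]
    -- A's loop in closed form
    rw [loopA_foldl S 0 S.sum]
    have ht : tailVals 0 S = (List.range' 1 n).map fval := by
      rw [tailVals_eq S 0, List.range'_eq_map_range, List.map_map]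
      apply List.map_congr_left
      intro i _
      simp only [Function.comp_apply, hfval]
      push_cast
      ring_nf
    have hsum : S.sum = fval 0 := by simp [hfval]
    rw [ht, hsum]
    have hA : (List.map fval (List.range' 1 n)).foldl max (fval 0)
        = nmax (List.map fval (List.range' 0 (n + 1))) := by
      rw [List.range'_succ, List.map_cons]
      rfl
    rw [hA]
    have hsplit : List.range' 0 (n + 1) = List.range' 0 n ++ [0 + n] :=
      List.range'_1_concat (s := 0) (n := n)
    rw [hsplit, List.map_append]
    rw [nmax_append _ _ (by simp) (by simp; omega)]
    have hfn : nmax (List.map fval [0 + n]) = 0 := by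
      simp [nmax, hfval, hn]
    rw [hfn, hv]

-- ===== VERDICT (by name: the statement is the Claim_ definition above) =====
theorem mandragora_spec : Claim_equal_mandragora := by
  intro H _
  unfold Spec_mandragora
  exact main_eq H
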